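-- pv_equiv track=rewrite | github.com/shaefeli/AdventOfCode | day6/day6.py | compute_nr_fishs
-- ===== SOURCE A (Python) =====
-- def add_to_dict(fishs_summary,fish,nr_incr):
--     if fish in fishs_summary:
--         fishs_summary[fish]+=nr_incr
--     else:
--         fishs_summary[fish]=nr_incr
--
-- def compute_nr_fishs(fishs,nr_turns):
--     #Create a dict that counts the number of fishs per state
--     fishs_summary = dict()
--     for fish in fishs:
--         add_to_dict(fishs_summary,fish,1)
--
--     for turn in range(nr_turns):
--         new_fish_summary=dict()
--         for fish,nr_fish in fishs_summary.items():
--             if fish>0: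
--                 add_to_dict(new_fish_summary,fish-1,nr_fish)
--             else:
--                 add_to_dict(new_fish_summary,6,nr_fish)
--                 add_to_dict(new_fish_summary,8,nr_fish)
--         fishs_summary=new_fish_summary.copy()
--
--     return sum(list(fishs_summary.values()))
-- ===== SOURCE B (Python) =====
-- def compute_nr_fishs(fishs, nr_turns):
--     if nr_turns <= 0:
--         return len(fishs)
--     # Bucket the fish by the turn at which their line starts reproducing:
--     # a fish with timer s contributes p(nr_turns - max(s, 0)), where p(t) is the
--     # population descending from one timer-0 fish after t turns (p(t) = 1 for t <= 0).
--     need = {}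
--     total = 0
--     for s in fishs:
--         d = nr_turns - s if s > 0 else nr_turns
--         if d <= 0:
--             total += 1
--         else:
--             need[d] = need.get(d, 0) + 1
--     # Sliding window of the last 9 values of p: p(t) = p(t-7) + p(t-9).
--     win = [1, 1, 1, 1, 1, 1, 1, 1, 1]
--     for t in range(1, nr_turns + 1):
--         v = win[2] + win[0]
--         win.append(v)
--         del win[0]
--         total += need.get(t, 0) * v
--     return total
-- ===== Notes on version B (the rewrite author's own statement) =====
-- stated objective: faster
-- what changed: Replaces the turn-by-turn dict-of-states simulation with per-fish analysis: fish are bucketed by the turn their line starts spawning, and a single sliding-window linear recurrence p(t)=p(t-7)+p(t-9) is swept once over the turns, accumulating the answer.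
import Mathlib
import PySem

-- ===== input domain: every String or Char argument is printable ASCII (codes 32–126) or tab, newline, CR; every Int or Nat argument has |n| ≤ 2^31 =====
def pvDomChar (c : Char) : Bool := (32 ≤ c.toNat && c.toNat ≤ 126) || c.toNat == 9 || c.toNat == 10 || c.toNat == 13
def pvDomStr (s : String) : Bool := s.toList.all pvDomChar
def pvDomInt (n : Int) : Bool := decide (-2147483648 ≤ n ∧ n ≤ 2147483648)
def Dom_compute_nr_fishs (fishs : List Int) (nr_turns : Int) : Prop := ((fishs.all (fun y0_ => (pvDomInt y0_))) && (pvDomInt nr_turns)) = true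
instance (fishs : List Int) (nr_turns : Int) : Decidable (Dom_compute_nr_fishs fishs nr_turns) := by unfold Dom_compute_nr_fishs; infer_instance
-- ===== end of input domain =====

-- B replaces the turn-by-turn dict-of-states simulation by bucketing the fish by spawn-start
-- turn and running one 9-term sliding-window recurrence p(t) = p(t-7) + p(t-9) (objective: faster).

-- ===== PORT A =====
def add_to_dict (fishs_summary : PySem.Dict Int Int) (fish : Int) (nr_incr : Int) : PySem.Dict Int Int :=
  if fishs_summary.contains fish then
    fishs_summary.insert fish (fishs_summary.getD fish 0 + nr_incr)
  else
    fishs_summary.insert fish nr_incr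

def compute_nr_fishs (fishs : List Int) (nr_turns : Int) : Int :=
  let fishs_summary := fishs.foldl (fun d fish => add_to_dict d fish 1) PySem.Dict.empty
  -- 'fishs_summary = new_fish_summary.copy()' : the copy is value-identical
  let fishs_summary := (PySem.List.pyRange 0 nr_turns).foldl (fun d _turn =>
      d.items.foldl (fun nd fp =>
        if fp.1 > 0 then add_to_dict nd (fp.1 - 1) fp.2
        else add_to_dict (add_to_dict nd 6 fp.2) 8 fp.2) PySem.Dict.empty) fishs_summary
  fishs_summary.values.sum

-- ===== PORT B =====
-- indices 2 and 0 into the 9-element window are always in range, so '.getD 0' is never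
-- exercised; '(win ++ [v]).drop 1' is 'win.append(v); del win[0]' on a nonempty list (exact here)
def compute_nr_fishs_alt (fishs : List Int) (nr_turns : Int) : Int :=
  if nr_turns ≤ 0 then (fishs.length : Int)
  else
    let st := fishs.foldl (fun (st : PySem.Dict Int Int × Int) s =>
        let d := if s > 0 then nr_turns - s else nr_turns
        if d ≤ 0 then (st.1, st.2 + 1)
        else (st.1.insert d (st.1.getD d 0 + 1), st.2)) (PySem.Dict.empty, (0 : Int))
    let need := st.1
    let res := (PySem.List.pyRange 1 (nr_turns + 1)).foldl (fun (st : List Int × Int) t =>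
        let v := (PySem.List.pyGet? st.1 2).getD 0 + (PySem.List.pyGet? st.1 0).getD 0
        ((st.1 ++ [v]).drop 1, st.2 + need.getD t 0 * v))
      (([1, 1, 1, 1, 1, 1, 1, 1, 1] : List Int), st.2)
    res.2

-- ===== PRECONDITION & SPEC =====
def Spec_compute_nr_fishs (fishs : List Int) (nr_turns : Int) (out : Int) : Prop := out = compute_nr_fishs_alt fishs nr_turns
instance (fishs : List Int) (nr_turns : Int) (out : Int) : Decidable (Spec_compute_nr_fishs fishs nr_turns out) := by unfold Spec_compute_nr_fishs; infer_instance

-- ===== CLAIM (what is proved, stated in full; the proofs are below) =====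
def Claim_equal_compute_nr_fishs : Prop := ∀ (fishs : List Int) (nr_turns : Int), Dom_compute_nr_fishs fishs nr_turns → Spec_compute_nr_fishs fishs nr_turns (compute_nr_fishs fishs nr_turns)

-- ===== LEMMAS AND PROOFS =====

-- single-fish descendant count after n turns, following A's transition
def c : Nat → Int → Int
  | 0, _ => 1
  | n + 1, s => if s > 0 then c n (s - 1) else c n 6 + c n 8

-- population after t turns descending from one timer-0 fish
def q : Nat → Int
  | 0 => 1
  | t + 1 => q (t - 6) + q (t - 8)

def pvF (nd : PySem.Dict Int Int) (fp : Int × Int) : PySem.Dict Int Int :=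
  if fp.1 > 0 then add_to_dict nd (fp.1 - 1) fp.2
  else add_to_dict (add_to_dict nd 6 fp.2) 8 fp.2

def pvStep (d : PySem.Dict Int Int) : PySem.Dict Int Int :=
  d.items.foldl pvF PySem.Dict.empty

def W (w : Int → Int) (d : PySem.Dict Int Int) : Int :=
  (d.items.map (fun p => p.2 * w p.1)).sum

lemma sum_map_replace (w : Int → Int) :
    ∀ (l : List (Int × Int)) (f a b : Int), (l.map (fun p => p.1)).Nodup → (f, a) ∈ l →
      ((l.map (fun p => if (p.1 == f) = true then (f, b) else p)).map (fun p => p.2 * w p.1)).sum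
        = (l.map (fun p => p.2 * w p.1)).sum + b * w f - a * w f := by
  intro l
  induction l with
  | nil => intro f a b _ hm; cases hm
  | cons p t ih =>
      intro f a b hnd hm
      simp only [List.map_cons, List.nodup_cons] at hnd ⊢
      obtain ⟨p1, p2⟩ := p
      rcases List.mem_cons.mp hm with he | ht
      · injection he with h1 h2
        subst h1; subst h2
        simp only [beq_self_eq_true, if_pos]
        have ht' : ∀ p' ∈ t, (if (p'.1 == f) = true then (f, b) else p') = p' := by
          intro p' hp'
          have hne : p'.1 ≠ f := by
            intro hcontra
            have hmem : p'.1 ∈ List.map (fun p : Int × Int => p.1) t := List.mem_map.mpr ⟨p', hp', rfl⟩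
            exact hnd.1 (hcontra ▸ hmem)
          simp [hne]
        rw [List.map_congr_left ht']
        simp only [List.sum_cons, List.map_id_fun', id]
        ring
      · have hf : f ∈ t.map (fun p => p.1) := List.mem_map.mpr ⟨(f, a), ht, rfl⟩
        have hne : p1 ≠ f := fun hc => hnd.1 (hc ▸ hf)
        simp only [show (p1 == f) = false by simpa using hne, Bool.false_eq_true, if_neg,
          not_false_iff, List.sum_cons]
        rw [ih f a b hnd.2 ht]
        ring

lemma nodup_add (d : PySem.Dict Int Int) (f v : Int) (h : d.keys.Nodup) :
    (add_to_dict d f v).keys.Nodup := by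
  unfold add_to_dict; split <;> exact PySem.Dict.nodup_keys_insert _ _ _ h

lemma W_add (w : Int → Int) (d : PySem.Dict Int Int) (f v : Int) (h : d.keys.Nodup) :
    W w (add_to_dict d f v) = W w d + v * w f := by
  unfold add_to_dict W
  by_cases hc : d.contains f = true
  · rw [if_pos hc]
    have hs : (d.get? f).isSome := by rw [← PySem.Dict.contains_eq_isSome_get?]; exact hc
    obtain ⟨a, ha⟩ := Option.isSome_iff_exists.mp hs
    have hgd : d.getD f 0 = a := by rw [PySem.Dict.getD_eq_get?_getD, ha]; rfl
    have hmem : (f, a) ∈ d.items := PySem.Dict.mem_items_of_get?_eq_some d ha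
    have hnd : (d.items.map (fun p => p.1)).Nodup := h
    rw [PySem.Dict.items_insert_of_contains d _ hc]
    rw [sum_map_replace w d.items f a (d.getD f 0 + v) hnd hmem, hgd]
    ring
  · rw [if_neg hc]
    rw [PySem.Dict.items_insert_of_not_contains d _ (Bool.not_eq_true _ ▸ hc)]
    simp only [List.map_append, List.sum_append, List.map_cons, List.map_nil, List.sum_cons,
      List.sum_nil]
    ring

lemma nodup_foldF : ∀ (l : List (Int × Int)) (nd : PySem.Dict Int Int),
    nd.keys.Nodup → (l.foldl pvF nd).keys.Nodup := by
  intro l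
  induction l with
  | nil => intro nd h; exact h
  | cons p t ih =>
      intro nd h
      refine ih _ ?_
      unfold pvF; split
      · exact nodup_add _ _ _ h
      · exact nodup_add _ _ _ (nodup_add _ _ _ h)

lemma W_foldF (w : Int → Int) : ∀ (l : List (Int × Int)) (nd : PySem.Dict Int Int),
    nd.keys.Nodup →
    W w (l.foldl pvF nd)
      = W w nd + (l.map (fun p => p.2 * (if p.1 > 0 then w (p.1 - 1) else w 6 + w 8))).sum := by
  intro l
  induction l with
  | nil => intro nd h; simp
  | cons p t ih =>
      intro nd h
      have hnd' : (pvF nd p).keys.Nodup := by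
        unfold pvF; split
        · exact nodup_add _ _ _ h
        · exact nodup_add _ _ _ (nodup_add _ _ _ h)
      simp only [List.foldl_cons, List.map_cons, List.sum_cons]
      rw [ih (pvF nd p) hnd']
      unfold pvF
      by_cases hp : p.1 > 0
      · rw [if_pos hp, if_pos hp, W_add w nd _ _ h]
        ring
      · rw [if_neg hp, if_neg hp, W_add w _ _ _ (nodup_add _ _ _ h), W_add w nd _ _ h]
        ring

lemma W_empty (w : Int → Int) : W w PySem.Dict.empty = 0 := rfl

lemma nodup_init : ∀ (l : List Int) (d : PySem.Dict Int Int),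
    d.keys.Nodup → (l.foldl (fun d x => add_to_dict d x 1) d).keys.Nodup := by
  intro l
  induction l with
  | nil => intro d h; exact h
  | cons s t ih => intro d h; exact ih _ (nodup_add _ _ _ h)

lemma W_init (w : Int → Int) : ∀ (l : List Int) (d : PySem.Dict Int Int),
    d.keys.Nodup →
    W w (l.foldl (fun d x => add_to_dict d x 1) d) = W w d + (l.map w).sum := by
  intro l
  induction l with
  | nil => intro d h; simp
  | cons s t ih =>
      intro d h
      simp only [List.foldl_cons, List.map_cons, List.sum_cons]
      rw [ih _ (nodup_add _ _ _ h), W_add w d _ _ h]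
      ring

lemma foldl_const_iter : ∀ (l : List Int) (d : PySem.Dict Int Int),
    l.foldl (fun d _ => pvStep d) d = pvStep^[l.length] d := by
  intro l
  induction l with
  | nil => intro d; rfl
  | cons a t ih =>
      intro d
      simp only [List.foldl_cons, List.length_cons, Function.iterate_succ_apply]
      exact ih (pvStep d)

lemma iterA : ∀ (n : Nat) (d : PySem.Dict Int Int), d.keys.Nodup →
    (pvStep^[n] d).values.sum = W (c n) d := by
  intro n
  induction n with
  | zero =>
      intro d h
      simp only [Function.iterate_zero, id]
      unfold W
      have hv : d.values = d.items.map (fun p => p.2) := rfl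
      rw [hv]
      apply congrArg
      apply List.map_congr_left
      intro p _
      simp [c]
  | succ n ih =>
      intro d h
      rw [Function.iterate_succ_apply, ih (pvStep d) (nodup_foldF _ _ PySem.Dict.nodup_keys_empty)]
      unfold pvStep
      rw [W_foldF (c n) d.items PySem.Dict.empty PySem.Dict.nodup_keys_empty, W_empty, zero_add]
      unfold W
      apply congrArg
      apply List.map_congr_left
      intro p _
      simp [c]

lemma A_total (fishs : List Int) (nr_turns : Int) :
    compute_nr_fishs fishs nr_turns = (fishs.map (fun s => c nr_turns.toNat s)).sum := by
  show ((PySem.List.pyRange 0 nr_turns).foldl (fun d _ => pvStep d)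
      (fishs.foldl (fun d fish => add_to_dict d fish 1) PySem.Dict.empty)).values.sum = _
  rw [foldl_const_iter, PySem.List.length_pyRange_one]
  rw [iterA _ _ (nodup_init fishs _ PySem.Dict.nodup_keys_empty)]
  rw [W_init _ fishs _ PySem.Dict.nodup_keys_empty, W_empty, zero_add]
  simp

lemma c_eq_q : ∀ (n : Nat) (s : Int), c n s = q (n - (max s 0).toNat) := by
  intro n
  induction n with
  | zero => intro s; simp [c, q]
  | succ n ih =>
      intro s
      by_cases hs : s > 0
      · have h1 : max s 0 = s := max_eq_left (le_of_lt hs)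
        have h2 : max (s - 1) 0 = s - 1 := max_eq_left (by omega)
        simp only [c, if_pos hs, ih, h1, h2]
        congr 1
        omega
      · have h1 : max s 0 = 0 := max_eq_right (by omega)
        simp only [c, if_neg hs, ih, h1]
        norm_num
        show q (n - 6) + q (n - 8) = q (n + 1 - 0)
        simp [q]

def window (k : Nat) : List Int :=
  [q (k - 8), q (k - 7), q (k - 6), q (k - 5), q (k - 4), q (k - 3), q (k - 2), q (k - 1), q k]

lemma window_zero : window 0 = [1, 1, 1, 1, 1, 1, 1, 1, 1] := by
  have h : q 0 = 1 := by simp [q]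
  simp [window, h]

def G (n : Int) (st : PySem.Dict Int Int × Int) (s : Int) : PySem.Dict Int Int × Int :=
  let d := if s > 0 then n - s else n
  if d ≤ 0 then (st.1, st.2 + 1) else (st.1.insert d (st.1.getD d 0 + 1), st.2)

def F2 (need : PySem.Dict Int Int) (st : List Int × Int) (t : Int) : List Int × Int :=
  let v := (PySem.List.pyGet? st.1 2).getD 0 + (PySem.List.pyGet? st.1 0).getD 0
  ((st.1 ++ [v]).drop 1, st.2 + need.getD t 0 * v)

def dl (n s : Int) : Int := if s > 0 then n - s else n

lemma phase1_getD (n : Int) : ∀ (l : List Int) (st : PySem.Dict Int Int × Int) (t : Int),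
    ((l.foldl (G n) st).1).getD t 0
      = st.1.getD t 0 + (l.countP (fun s => decide (dl n s = t) && decide (0 < dl n s)) : Int) := by
  intro l
  induction l with
  | nil => intro st t; simp
  | cons s l ih =>
      intro st t
      simp only [List.foldl_cons, List.countP_cons]
      rw [ih (G n st s)]
      unfold G dl
      by_cases hd : (if s > 0 then n - s else n) ≤ 0
      · have : ¬ (0 : Int) < (if s > 0 then n - s else n) := by omega
        simp only [if_pos hd, decide_eq_false this, Bool.and_false]
        push_cast
        ring
      · simp only [if_neg hd]
        rw [PySem.Dict.getD_insert]
        by_cases ht : t = (if s > 0 then n - s else n)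
        · have h1 : decide ((if s > 0 then n - s else n) = t) = true := by simp [ht]
          have h2 : decide ((0:Int) < (if s > 0 then n - s else n)) = true := by
            simp; omega
          simp only [if_pos ht, h1, h2, Bool.and_self]
          rw [← ht]
          push_cast
          ring
        · have h1 : decide ((if s > 0 then n - s else n) = t) = false := by
            simp; exact fun hc => ht hc.symm
          simp only [if_neg ht, h1, Bool.false_and]
          push_cast
          ring

lemma phase1_snd (n : Int) : ∀ (l : List Int) (st : PySem.Dict Int Int × Int),
    (l.foldl (G n) st).2 = st.2 + (l.countP (fun s => decide (dl n s ≤ 0)) : Int) := by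
  intro l
  induction l with
  | nil => intro st; simp
  | cons s t ih =>
      intro st
      simp only [List.foldl_cons, List.countP_cons]
      rw [ih (G n st s)]
      unfold G dl
      by_cases hd : (if s > 0 then n - s else n) ≤ 0
      · simp only [if_pos hd, decide_eq_true hd]
        push_cast
        ring
      · simp only [if_neg hd, decide_eq_false hd]
        push_cast
        ring

lemma q_succ (k : Nat) : q (k + 1) = q (k - 6) + q (k - 8) := by simp [q]
lemma window_step (k : Nat) : ((window k) ++ [q (k + 1)]).drop 1 = window (k + 1) := by
  have h1 : k + 1 - 8 = k - 7 := by omega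
  have h2 : k + 1 - 7 = k - 6 := by omega
  have h3 : k + 1 - 6 = k - 5 := by omega
  have h4 : k + 1 - 5 = k - 4 := by omega
  have h5 : k + 1 - 4 = k - 3 := by omega
  have h6 : k + 1 - 3 = k - 2 := by omega
  have h7 : k + 1 - 2 = k - 1 := by omega
  have h8 : k + 1 - 1 = k := by omega
  simp [window, h1, h2, h3, h4, h5, h6, h7, h8]
lemma window_get2 (k : Nat) : (PySem.List.pyGet? (window k) 2).getD 0 = q (k - 6) := by
  simp [PySem.List.pyGet?, window, show PySem.List.pyIdx? 9 2 = some 2 from by decide]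
lemma window_get0 (k : Nat) : (PySem.List.pyGet? (window k) 0).getD 0 = q (k - 8) := by
  simp [PySem.List.pyGet?, window, show PySem.List.pyIdx? 9 0 = some 0 from by decide]
lemma F2_step (need : PySem.Dict Int Int) (k : Nat) (T : Int) (t : Int) :
    F2 need (window k, T) t = (window (k + 1), T + need.getD t 0 * q (k + 1)) := by
  show ((((window k) ++ [(PySem.List.pyGet? (window k) 2).getD 0 + (PySem.List.pyGet? (window k) 0).getD 0]).drop 1),
      T + need.getD t 0 * ((PySem.List.pyGet? (window k) 2).getD 0 + (PySem.List.pyGet? (window k) 0).getD 0))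
    = (window (k + 1), T + need.getD t 0 * q (k + 1))
  rw [window_get2, window_get0, ← q_succ, window_step]
lemma dl_eq (n s : Int) : dl n s = n - max s 0 := by
  unfold dl
  by_cases h : s > 0
  · rw [if_pos h, max_eq_left h.le]
  · rw [if_neg h, max_eq_right (by omega), sub_zero]

lemma loop2 (need : PySem.Dict Int Int) : ∀ (j k : Nat) (T : Int),
    (PySem.List.pyRange ((k : Int) + 1) ((k : Int) + 1 + (j : Int))).foldl (F2 need) (window k, T)
      = (window (k + j),
         T + ((List.range j).map (fun (i : Nat) => need.getD ((k : Int) + 1 + (i : Int)) 0 * q ((k + 1 + i : Nat)))).sum) := by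
  intro j
  induction j with
  | zero =>
      intro k T
      rw [PySem.List.pyRange_one_eq_nil (by push_cast; omega)]
      simp
  | succ j ih =>
      intro k T
      rw [PySem.List.pyRange_one_cons (by push_cast; omega)]
      simp only [List.foldl_cons]
      rw [F2_step]
      rw [show (k : Int) + 1 + 1 = ((k + 1 : Nat) : Int) + 1 by push_cast; ring]
      rw [show (k : Int) + 1 + ((j + 1 : Nat) : Int) = ((k + 1 : Nat) : Int) + 1 + (j : Int) by push_cast; ring]
      rw [ih (k + 1) (T + need.getD ((k : Int) + 1) 0 * q (k + 1))]
      rw [show k + 1 + j = k + (j + 1) from by omega]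
      refine congrArg _ ?_
      rw [List.range_succ_eq_map]
      simp only [List.map_cons, List.sum_cons, List.map_map]
      have hmap : ∀ i ∈ List.range j,
          need.getD (((k + 1 : Nat) : Int) + 1 + (i : Int)) 0 * q ((k + 1 + 1 + i : Nat))
            = ((fun (i : Nat) => need.getD ((k : Int) + 1 + (i : Int)) 0 * q ((k + 1 + i : Nat))) ∘ Nat.succ) i := by
        intro i _
        simp only [Function.comp]
        rw [show ((k + 1 : Nat) : Int) + 1 + (i : Int) = (k : Int) + 1 + ((Nat.succ i : Nat) : Int) by push_cast; ring]
        rw [show k + 1 + 1 + i = k + 1 + Nat.succ i from by omega]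
      rw [List.map_congr_left hmap]
      rw [show (k : Int) + 1 + ((0 : Nat) : Int) = (k : Int) + 1 by push_cast; ring]
      rw [show k + 1 + 0 = k + 1 from by omega]
      ring

lemma pick : ∀ (N : Nat) (a : Int) (x : Nat → Int), 1 ≤ a → a ≤ (N : Int) →
    ((List.range N).map (fun (i : Nat) => (if a = 1 + (i : Int) then (1 : Int) else 0) * x ((1 + i : Nat)))).sum
      = x a.toNat := by
  intro N
  induction N with
  | zero => intro a x h1 h2; omega
  | succ N ih =>
      intro a x h1 h2
      rw [List.range_succ, List.map_append, List.sum_append]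
      by_cases ha : a = 1 + (N : Int)
      · have hz : ∀ i ∈ List.range N, (if a = 1 + (i : Int) then (1 : Int) else 0) * x ((1 + i : Nat)) = 0 := by
          intro i hi
          have : (i : Int) < N := by exact_mod_cast List.mem_range.mp hi
          have : a ≠ 1 + (i : Int) := by omega
          simp [this]
        rw [List.map_congr_left hz]
        have hN : ((1 : Int) + (N : Int)).toNat = 1 + N := by omega
        simp [ha, hN]
      · have h2' : a ≤ (N : Int) := by push_cast at h2 ⊢; omega
        rw [ih a x h1 h2']
        simp [ha]

lemma combine (n : Int) (hn : 0 < n) : ∀ (l : List Int),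
    (l.map (fun s => q (n.toNat - (max s 0).toNat))).sum
      = (l.countP (fun s => decide (dl n s ≤ 0)) : Int)
        + ((List.range n.toNat).map
            (fun (i : Nat) => (l.countP (fun s => decide (dl n s = 1 + (i : Int))) : Int) * q ((1 + i : Nat)))).sum := by
  intro l
  induction l with
  | nil => simp
  | cons s l ih =>
      simp only [List.map_cons, List.sum_cons, List.countP_cons]
      have hsplit : ∀ i ∈ List.range n.toNat,
          ((l.countP (fun s' => decide (dl n s' = 1 + (i : Int)))
             + if (fun s' => decide (dl n s' = 1 + (i : Int))) s then 1 else 0 : Nat) : Int) * q ((1 + i : Nat))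
            = (l.countP (fun s' => decide (dl n s' = 1 + (i : Int))) : Int) * q ((1 + i : Nat))
              + (if dl n s = 1 + (i : Int) then (1 : Int) else 0) * q ((1 + i : Nat)) := by
        intro i _
        by_cases h : dl n s = 1 + (i : Int) <;> simp [h] <;> push_cast <;> ring
      rw [List.map_congr_left hsplit, PySem.List.sum_map_add_int, ih]
      have hmax : dl n s = n - max s 0 := dl_eq n s
      by_cases hd : dl n s ≤ 0
      · have h0 : n.toNat - (max s 0).toNat = 0 := by omega
        have hz : ∀ i ∈ List.range n.toNat,
            (if dl n s = 1 + (i : Int) then (1 : Int) else 0) * q ((1 + i : Nat)) = 0 := by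
          intro i _
          have : dl n s ≠ 1 + (i : Int) := by omega
          simp [this]
        rw [List.map_congr_left hz, h0]
        simp [show q 0 = 1 from by simp [q], decide_eq_true hd]
        ring
      · have h1 : (1 : Int) ≤ dl n s := by omega
        have h2 : dl n s ≤ ((n.toNat : Nat) : Int) := by omega
        have hp := pick n.toNat (dl n s) q h1 h2
        rw [hp]
        have hT : (dl n s).toNat = n.toNat - (max s 0).toNat := by omega
        rw [hT]
        simp [decide_eq_false hd]
        ring

lemma B_total (fishs : List Int) (nr_turns : Int) :
    compute_nr_fishs_alt fishs nr_turns = (fishs.map (fun s => c nr_turns.toNat s)).sum := by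
  have hc : ∀ s, c nr_turns.toNat s = q (nr_turns.toNat - (max s 0).toNat) := fun s => c_eq_q _ s
  rw [List.map_congr_left (fun s _ => hc s)]
  by_cases hn : nr_turns ≤ 0
  · rw [compute_nr_fishs_alt, if_pos hn]
    have h0 : nr_turns.toNat = 0 := by omega
    simp [h0, show q 0 = 1 from by simp [q]]
  · rw [compute_nr_fishs_alt, if_neg hn]
    have hn' : 0 < nr_turns := by omega
    show ((PySem.List.pyRange 1 (nr_turns + 1)).foldl
        (F2 ((fishs.foldl (G nr_turns) (PySem.Dict.empty, 0)).1))
        (([1, 1, 1, 1, 1, 1, 1, 1, 1] : List Int),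
          (fishs.foldl (G nr_turns) (PySem.Dict.empty, 0)).2)).2 = _
    rw [← window_zero]
    have hl := loop2 ((fishs.foldl (G nr_turns) (PySem.Dict.empty, 0)).1) nr_turns.toNat 0
      ((fishs.foldl (G nr_turns) (PySem.Dict.empty, 0)).2)
    norm_num at hl
    rw [show (1 : Int) + max nr_turns 0 = nr_turns + 1 from by omega] at hl
    rw [hl]
    dsimp only
    rw [phase1_snd nr_turns fishs (PySem.Dict.empty, 0), zero_add]
    have hterm : ∀ i ∈ List.range nr_turns.toNat,
        (fishs.foldl (G nr_turns) (PySem.Dict.empty, 0)).1.getD (1 + (i : Int)) 0 * q (1 + i)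
          = (fishs.countP (fun s => decide (dl nr_turns s = 1 + (i : Int))) : Int) * q ((1 + i : Nat)) := by
      intro i _
      rw [phase1_getD nr_turns fishs (PySem.Dict.empty, 0) (1 + (i : Int)), PySem.Dict.getD_empty,
        zero_add]
      congr 2
      apply List.countP_congr
      intro s _
      constructor
      · intro h
        simp only [Bool.and_eq_true, decide_eq_true_eq] at h ⊢
        exact h.1
      · intro h
        simp only [decide_eq_true_eq] at h
        simp only [Bool.and_eq_true, decide_eq_true_eq]
        exact ⟨h, by omega⟩
    rw [List.map_congr_left hterm]
    exact (combine nr_turns hn' fishs).symm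

-- ===== VERDICT (by name: the statement is the Claim_ definition above) =====
theorem compute_nr_fishs_spec : Claim_equal_compute_nr_fishs := by
  intro fishs nr_turns _
  unfold Spec_compute_nr_fishs
  rw [A_total, B_total]
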